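-- pv_equiv track=rewrite | github.com/romhack/einhanderTools | einlzss/einlzss.py | find_lz
-- ===== SOURCE A (Python) =====
-- from typing import NamedTuple
--
-- class LzEntry(NamedTuple):
--     distance: int  # offset back in unpacked buffer, 12 bits
--     length: int  # copy count, 4 bits
--
-- MAX_OFFSET = 0xFFE  # lz offset is encoded with 12 bits, 1-starting
--
-- MAX_LEN = 0x11  # lz length is encoded with 8 bits
--
-- def find_lz(lst, pos):
--     '''
--     find best lz match for given position and haystack list
--
--     Parameters
--     ----------
--     lst : list of ints
--         full plain file
--     pos : int
--         position in plain file to search an lz match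
--
--     Returns
--     -------
--     LzEntry or None
--         found best lz entry for this position, if not found, return None
--
--     '''
--     def common_start_len(lst, hay_start, pos):
--         count = 0
--         while count < MAX_LEN and pos < len(lst) and lst[hay_start] == lst[pos]:
--             hay_start += 1
--             pos += 1
--             count += 1
--         return count
--
--     assert lst and pos < len(
--         lst), "find_lz: position out of bounds or empty list!"
--     candidates = []
--     # max offset back is 0xFF, haystack start from pos-0xFF, trimmed by 0
--     for hay_start in range(0, min (MAX_OFFSET, pos)):
--         common_len = common_start_len(lst, hay_start, pos)
--         if common_len >= 2:  # minimal efficient entry is 2 bytes long lz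
--             candidates.append(
--                 LzEntry(distance=hay_start, length=common_len))
--     # compare candidates first by length, next by earliest occurence
--     best = max(candidates, key=lambda ent: (ent.length, -ent.distance),
--                default=None)
--
--     return best
-- ===== SOURCE B (Python) =====
-- from typing import NamedTuple
--
-- class LzEntry(NamedTuple):
--     distance: int
--     length: int
--
-- MAX_OFFSET = 0xFFE
-- MAX_LEN = 0x11
--
-- def find_lz(lst, pos):
--     '''single-pass running-best scan: no candidate list, no max() pass'''
--     assert lst and pos < len(
--         lst), "find_lz: position out of bounds or empty list!"
--     n = len(lst)
--     best_len = 1  # anything below the minimal efficient length 2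
--     best_start = 0
--     for hay_start in range(0, min(MAX_OFFSET, pos)):
--         k = 0
--         while k < MAX_LEN and pos + k < n and lst[hay_start + k] == lst[pos + k]:
--             k += 1
--         if k > best_len:  # strict: earliest hay_start wins ties
--             best_len = k
--             best_start = hay_start
--     if best_len >= 2:
--         return LzEntry(distance=best_start, length=best_len)
--     return None
-- ===== Notes on version B (the rewrite author's own statement) =====
-- stated objective: simpler
-- what changed: Replaced the candidate-list accumulation plus a separate max(key=(length,-distance)) pass with a single running-best scan (strict > update so the earliest hay_start wins ties), and the pointer-advancing common-prefix helper with an index-offset loop.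
import Mathlib
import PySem

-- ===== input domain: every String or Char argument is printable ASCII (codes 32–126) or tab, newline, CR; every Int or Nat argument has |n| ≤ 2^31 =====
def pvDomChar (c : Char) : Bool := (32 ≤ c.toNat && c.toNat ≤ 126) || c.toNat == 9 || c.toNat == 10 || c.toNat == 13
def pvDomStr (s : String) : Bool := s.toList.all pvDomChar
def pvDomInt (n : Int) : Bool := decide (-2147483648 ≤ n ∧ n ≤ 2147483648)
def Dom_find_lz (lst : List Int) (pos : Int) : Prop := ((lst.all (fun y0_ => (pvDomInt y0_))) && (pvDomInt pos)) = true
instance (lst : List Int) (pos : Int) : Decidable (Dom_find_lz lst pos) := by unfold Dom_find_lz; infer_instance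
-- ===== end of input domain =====

-- B replaces A's candidate-list + max(key=(length,-distance)) pass by a single running-best
-- scan (strict > so the earliest hay_start keeps ties); objective: simpler, same cost.

-- ===== PORT A =====
-- A's inner while loop: advances hay, pos and count together; fuel 17 = MAX_LEN bounds it
-- (count increases each step and the loop stops at count = 17, so fuel 17 is exact).
def cslA (lst : List Int) : Nat → Int → Int → Int → Int
  | 0, _, _, count => count
  | fuel+1, hay, pos, count =>
    if count < 17 ∧ pos < (lst.length : Int) ∧ PySem.List.pyGet? lst hay = PySem.List.pyGet? lst pos
    then cslA lst fuel (hay+1) (pos+1) (count+1)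
    else count

def find_lz (lst : List Int) (pos : Int) : Option (Int × Int) :=
  -- assert (lst nonempty and pos < len) raises outside Pre_; nothing claimed there
  let candidates : List (Int × Int) :=
    (PySem.List.pyRange 0 (min 4094 pos) 1).foldl
      (fun acc hay_start =>
        let common_len := cslA lst 17 hay_start pos 0
        if 2 ≤ common_len then acc ++ [(hay_start, common_len)] else acc) []
  PySem.List.max2? candidates (fun ent => ent.2) (fun ent => -ent.1)

-- ===== PORT B =====
-- B's inner while loop: a single offset k against fixed hay_start and pos.
def cslB (lst : List Int) (hay pos : Int) : Nat → Int → Int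
  | 0, k => k
  | fuel+1, k =>
    if k < 17 ∧ pos + k < (lst.length : Int) ∧ PySem.List.pyGet? lst (hay+k) = PySem.List.pyGet? lst (pos+k)
    then cslB lst hay pos fuel (k+1)
    else k

def find_lz_alt (lst : List Int) (pos : Int) : Option (Int × Int) :=
  let st :=
    (PySem.List.pyRange 0 (min 4094 pos) 1).foldl
      (fun (b : Int × Int) hay_start =>
        let k := cslB lst hay_start pos 17 0
        if b.1 < k then (k, hay_start) else b) (1, 0)
  if 2 ≤ st.1 then some (st.2, st.1) else none

-- ===== PRECONDITION & SPEC =====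
-- Pre_ excludes exactly the inputs on which A's assert raises (empty list or pos ≥ len).
def Pre_find_lz (lst : List Int) (pos : Int) : Prop := lst ≠ [] ∧ pos < (lst.length : Int)
instance (lst : List Int) (pos : Int) : Decidable (Pre_find_lz lst pos) := by
  unfold Pre_find_lz; infer_instance
def pvWitness_find_lz : List Int × Int := ([1, 1, 2], 2)

def Spec_find_lz (lst : List Int) (pos : Int) (out : Option (Int × Int)) : Prop := out = find_lz_alt lst pos
instance (lst : List Int) (pos : Int) (out : Option (Int × Int)) : Decidable (Spec_find_lz lst pos out) := by unfold Spec_find_lz; infer_instance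

-- ===== CLAIM (what is proved, stated in full; the proofs are below) =====
def Claim_equal_find_lz : Prop := ∀ (lst : List Int) (pos : Int), Dom_find_lz lst pos → Pre_find_lz lst pos → Spec_find_lz lst pos (find_lz lst pos)

-- ===== LEMMAS AND PROOFS =====

-- The two common-prefix loops compute the same count.
theorem csl_eq (lst : List Int) (pos : Int) :
    ∀ (fuel : Nat) (hay k : Int),
      cslA lst fuel (hay + k) (pos + k) k = cslB lst hay pos fuel k := by
  intro fuel
  induction fuel with
  | zero => intro hay k; rfl
  | succ n ih =>
    intro hay k
    simp only [cslA, cslB]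
    split_ifs with h
    · have e1 : hay + k + 1 = hay + (k + 1) := by ring
      have e2 : pos + k + 1 = pos + (k + 1) := by ring
      rw [e1, e2, ih]
    · rfl

theorem foldl_build_fuse {β : Type} (s : β → Int × Int → β)
    (P : Int → Prop) [DecidablePred P] (c : Int → Int) :
    ∀ (r : List Int) (acc : List (Int × Int)) (i : β),
      (r.foldl (fun a h => if P h then a ++ [(h, c h)] else a) acc).foldl s i =
      r.foldl (fun m h => if P h then s m (h, c h) else m) (acc.foldl s i) := by
  intro r
  induction r with
  | nil => intro acc i; rfl
  | cons h t ih =>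
    intro acc i
    simp only [List.foldl_cons]
    rw [ih]
    congr 1
    split_ifs with hp
    · rw [List.foldl_append]; rfl
    · rfl

-- The max2? step for key (length, -distance).
def stepA (m : Option (Int × Int)) (x : Int × Int) : Option (Int × Int) :=
  match m with
  | none => some x
  | some mm =>
    if (decide (mm.2 < x.2) || !decide (x.2 < mm.2) && decide (-mm.1 < -x.1)) = true
    then some x else some mm

-- Main loop equivalence: candidate-list-max fold vs running-best fold, over an
-- ascending index list.
theorem loop_equiv (c : Int → Int) :
    ∀ (r : List Int), r.Pairwise (· < ·) →
    ∀ (m : Option (Int × Int)) (st : Int × Int),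
      ((st.1 = 1 ∧ m = none) ∨
       (2 ≤ st.1 ∧ m = some (st.2, st.1) ∧ ∀ h ∈ r, st.2 < h)) →
      r.foldl (fun mm h => if 2 ≤ c h then stepA mm (h, c h) else mm) m =
      (fun st' : Int × Int => if 2 ≤ st'.1 then some (st'.2, st'.1) else none)
        (r.foldl (fun (b : Int × Int) h => if b.1 < c h then (c h, h) else b) st) := by
  intro r
  induction r with
  | nil =>
    intro _ m st hinv
    rcases hinv with ⟨h1, hm⟩ | ⟨h2, hm, _⟩
    · simp [hm, h1]
    · simp [hm]
      omega
  | cons h t ih =>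
    intro hpw m st hinv
    rcases List.pairwise_cons.mp hpw with ⟨hlt, hpw'⟩
    simp only [List.foldl_cons]
    rcases hinv with ⟨h1, hm⟩ | ⟨h2, hm, hst⟩
    · subst hm
      by_cases hc : 2 ≤ c h
      · have hb : st.1 < c h := by omega
        rw [if_pos hc, if_pos hb]
        exact ih hpw' _ _ (Or.inr ⟨hc, rfl, fun x hx => hlt x hx⟩)
      · have hb : ¬ st.1 < c h := by omega
        rw [if_neg hc, if_neg hb]
        exact ih hpw' _ _ (Or.inl ⟨h1, rfl⟩)
    · subst hm
      have hsh : st.2 < h := hst h (List.mem_cons_self)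
      by_cases hb : st.1 < c h
      · have hc : 2 ≤ c h := by omega
        rw [if_pos hc, if_pos hb]
        have : stepA (some (st.2, st.1)) (h, c h) = some (h, c h) := by
          simp [stepA, hb]
        rw [this]
        exact ih hpw' _ _ (Or.inr ⟨hc, rfl, fun x hx => hlt x hx⟩)
      · rw [if_neg hb]
        have hkeep :
            (if 2 ≤ c h then stepA (some (st.2, st.1)) (h, c h) else some (st.2, st.1))
              = some (st.2, st.1) := by
          split_ifs with hc
          · simp only [stepA]
            have h1 : ¬ st.1 < c h := hb
            have h2 : ¬ (-st.2 < -h) := by omega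
            simp [h1, h2]
          · rfl
        rw [hkeep]
        exact ih hpw' _ _ (Or.inr ⟨h2, rfl, fun x hx => hst x (List.mem_cons_of_mem _ hx)⟩)

theorem max2?_eq_foldl_stepA (xs : List (Int × Int)) :
    PySem.List.max2? xs (fun ent => ent.2) (fun ent => -ent.1) = xs.foldl stepA none := by
  unfold PySem.List.max2?
  congr 1
  funext acc x
  cases acc <;> rfl

-- ===== VERDICT (by name: the statement is the Claim_ definition above) =====
theorem find_lz_spec : Claim_equal_find_lz := by
  intro lst pos _ _
  unfold Spec_find_lz find_lz find_lz_alt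
  rw [max2?_eq_foldl_stepA]
  rw [foldl_build_fuse stepA (fun h => 2 ≤ cslA lst 17 h pos 0) (fun h => cslA lst 17 h pos 0)]
  have hcsl : ∀ h : Int, cslB lst h pos 17 0 = cslA lst 17 h pos 0 := by
    intro h
    have := csl_eq lst pos 17 h 0
    simpa using this.symm
  simp only [hcsl]
  exact loop_equiv (fun h => cslA lst 17 h pos 0) _
    (PySem.List.pairwise_lt_pyRange_one 0 (min 4094 pos) )
    none (1, 0) (Or.inl ⟨rfl, rfl⟩)
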